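-- pv_equiv track=rewrite | github.com/jonathonreilly/toy-physics | scripts/dense_prune_frozen_field_control.py | _reverse_closure
-- ===== SOURCE A (Python) =====
-- from collections import defaultdict, deque
--
-- def _reverse_closure(adj: dict[int, list[int]], targets: list[int]) -> set[int]:
--     rev: dict[int, list[int]] = defaultdict(list)
--     for i, nbs in adj.items():
--         for j in nbs:
--             rev[j].append(i)
--     seen: set[int] = set(targets)
--     q = deque(targets)
--     while q:
--         i = q.popleft()
--         for p in rev.get(i, []):
--             if p not in seen:
--                 seen.add(p)
--                 q.append(p)
--     return seen
-- ===== SOURCE B (Python) =====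
-- def _reverse_closure(adj: dict[int, list[int]], targets: list[int]) -> set[int]:
--     # No reverse-adjacency index and no element-wise conditional enqueue:
--     # each dequeued node does one forward scan of adj, collecting ALL of its
--     # still-unseen predecessors as a batch, then updates seen and the queue in bulk.
--     seen: set[int] = set(targets)
--     q = list(targets)
--     while q:
--         i = q.pop(0)
--         new = [p for p, nbs in adj.items() if p not in seen and i in nbs]
--         seen.update(new)
--         q.extend(new)
--     return seen
-- ===== Notes on version B (the rewrite author's own statement) =====
-- stated objective: alternative
-- what changed: B drops A's reverse-adjacency index and the element-wise conditional enqueue: each dequeued node does one forward scan of the adjacency dict collecting its unseen predecessors as a batch (list comprehension), then updates seen and the queue in bulk.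
import Mathlib
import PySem

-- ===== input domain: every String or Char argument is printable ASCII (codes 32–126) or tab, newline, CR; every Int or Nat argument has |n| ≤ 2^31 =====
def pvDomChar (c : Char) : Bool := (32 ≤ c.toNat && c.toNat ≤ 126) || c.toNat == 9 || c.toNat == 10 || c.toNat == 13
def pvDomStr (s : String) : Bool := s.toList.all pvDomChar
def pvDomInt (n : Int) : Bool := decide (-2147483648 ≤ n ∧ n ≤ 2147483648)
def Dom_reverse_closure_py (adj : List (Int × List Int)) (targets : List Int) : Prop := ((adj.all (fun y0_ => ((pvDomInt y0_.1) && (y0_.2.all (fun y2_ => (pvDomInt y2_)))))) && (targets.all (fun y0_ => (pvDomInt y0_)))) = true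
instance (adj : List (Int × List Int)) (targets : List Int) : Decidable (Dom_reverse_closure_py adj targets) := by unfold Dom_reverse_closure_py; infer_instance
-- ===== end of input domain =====

-- B removes A's reverse-adjacency index and its element-wise conditional enqueue:
-- each dequeued node makes one forward scan of adj collecting all its unseen
-- predecessors as a batch, then updates seen and the queue in bulk (alternative, not faster).

-- ===== PORT A =====
-- while-loop of A with a fuel bound (fuel only makes the recursion total:
-- at most |targets| + |adj| nodes are ever enqueued, so the queue empties first)
def pvLoopA (rev : PySem.Dict Int (List Int)) : Nat → PySem.Set Int → List Int → List Int
  | 0, seen, _ => seen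
  | _ + 1, seen, [] => seen
  | fuel + 1, seen, i :: q =>
    let s := (rev.getD i []).foldl
      (fun s p => if s.1.contains p then s else (PySem.Set.add s.1 p, s.2 ++ [p])) (seen, q)
    pvLoopA rev fuel s.1 s.2

def reverse_closure_py (adj : List (Int × List Int)) (targets : List Int) : List Int :=
  let rev : PySem.Dict Int (List Int) :=
    adj.foldl (fun r pn => pn.2.foldl (fun r j => r.modify j [] (· ++ [pn.1])) r) PySem.Dict.empty
  pvLoopA rev (targets.length + adj.length) (PySem.Set.ofList targets) targets

-- ===== PORT B =====
-- the list comprehension: all still-unseen predecessors of i, in adj order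
def pvScan (adj : List (Int × List Int)) (seen : PySem.Set Int) (i : Int) : List Int :=
  (adj.filter (fun pn => !seen.contains pn.1 && pn.2.contains i)).map Prod.fst

-- B's while-loop: dequeue i, batch-collect new, bulk-update seen and q (same fuel bound)
def pvLoopB (adj : List (Int × List Int)) : Nat → PySem.Set Int → List Int → List Int
  | 0, seen, _ => seen
  | _ + 1, seen, [] => seen
  | fuel + 1, seen, i :: q =>
    let new := pvScan adj seen i
    pvLoopB adj fuel (new.foldl PySem.Set.add seen) (q ++ new)

def reverse_closure_py_alt (adj : List (Int × List Int)) (targets : List Int) : List Int :=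
  pvLoopB adj (targets.length + adj.length) (PySem.Set.ofList targets) targets

-- ===== PRECONDITION & SPEC =====
-- Pre_ requires the keys of adj to be pairwise distinct: adj stands for a Python
-- dict, whose keys are necessarily distinct, so every Python input satisfies it;
-- it excludes only association lists no Python call can produce.
def Pre_reverse_closure_py (adj : List (Int × List Int)) (targets : List Int) : Prop :=
  (adj.map Prod.fst).Nodup
instance (adj : List (Int × List Int)) (targets : List Int) : Decidable (Pre_reverse_closure_py adj targets) := by unfold Pre_reverse_closure_py; infer_instance

def pvWitness_reverse_closure_py : (List (Int × List Int)) × List Int :=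
  ([(1, [2]), (2, [3])], [3])

def Spec_reverse_closure_py (adj : List (Int × List Int)) (targets : List Int) (out : List Int) : Prop := out = reverse_closure_py_alt adj targets
instance (adj : List (Int × List Int)) (targets : List Int) (out : List Int) : Decidable (Spec_reverse_closure_py adj targets out) := by unfold Spec_reverse_closure_py; infer_instance

-- ===== CLAIM (what is proved, stated in full; the proofs are below) =====
def Claim_equal_reverse_closure_py : Prop := ∀ (adj : List (Int × List Int)) (targets : List Int), Dom_reverse_closure_py adj targets → Pre_reverse_closure_py adj targets → Spec_reverse_closure_py adj targets (reverse_closure_py adj targets)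

-- ===== LEMMAS AND PROOFS =====

-- getD of one defaultdict-append pass over nbs
theorem pv_getD_entry (nbs : List Int) (p i : Int) :
    ∀ rev : PySem.Dict Int (List Int),
      (nbs.foldl (fun r j => r.modify j [] (· ++ [p])) rev).getD i []
        = rev.getD i [] ++ List.replicate (nbs.count i) p := by
  induction nbs with
  | nil => intro rev; simp
  | cons j nbs ih =>
    intro rev
    simp only [List.foldl_cons, ih, PySem.Dict.getD_modify, List.count_cons]
    by_cases h : i = j
    · subst h; simp [List.replicate_succ]
    · have : ¬ (j = i) := fun hh => h hh.symm
      simp [h, this]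

-- getD of the full reverse-index build
theorem pv_getD_rev (adj : List (Int × List Int)) (i : Int) :
    ∀ d : PySem.Dict Int (List Int),
      (adj.foldl (fun r pn => pn.2.foldl (fun r j => r.modify j [] (· ++ [pn.1])) r) d).getD i []
        = d.getD i [] ++ adj.flatMap (fun pn => List.replicate (pn.2.count i) pn.1) := by
  induction adj with
  | nil => intro d; simp
  | cons pn adj ih =>
    intro d
    simp only [List.foldl_cons, ih, List.flatMap_cons, pv_getD_entry, List.append_assoc]

-- A's inner fold over a replicate block = one conditional step
theorem pv_fold_replicate (n : Nat) (p : Int) (s : PySem.Set Int × List Int) :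
    (List.replicate n p).foldl
        (fun s p => if s.1.contains p then s else (PySem.Set.add s.1 p, s.2 ++ [p])) s
      = if s.1.contains p = false ∧ 0 < n then (PySem.Set.add s.1 p, s.2 ++ [p]) else s := by
  induction n generalizing s with
  | zero => simp
  | succ n ih =>
    rw [List.replicate_succ, List.foldl_cons]
    by_cases hm : p ∈ s.1
    · have hc : s.1.contains p = true := (PySem.Set.contains_iff s.1 p).mpr hm
      rw [if_pos hc, ih]
      simp [hm]
    · have hc : s.1.contains p = false := by
        have h := PySem.Set.contains_iff s.1 p
        revert h; cases s.1.contains p <;> simp_all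
      rw [if_neg (by simp [hm]), ih, if_neg (by simp [PySem.Set.mem_add]), if_pos ⟨hc, n.succ_pos⟩]

-- A's inner fold over rev[i] = an incremental forward scan of adj
theorem pv_inner (adj : List (Int × List Int)) (i : Int) :
    ∀ s : PySem.Set Int × List Int,
      (adj.flatMap (fun pn => List.replicate (pn.2.count i) pn.1)).foldl
          (fun s p => if s.1.contains p then s else (PySem.Set.add s.1 p, s.2 ++ [p])) s
        = adj.foldl
          (fun s pn => if s.1.contains pn.1 = false ∧ pn.2.contains i then (PySem.Set.add s.1 pn.1, s.2 ++ [pn.1]) else s) s := by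
  induction adj with
  | nil => intro s; simp
  | cons pn adj ih =>
    intro s
    simp only [List.flatMap_cons, List.foldl_cons, List.foldl_append, pv_fold_replicate, ih]
    have hcnt : (0 < pn.2.count i) ↔ (pn.2.contains i = true) := by
      simp [List.count_pos_iff]
    by_cases hmem : pn.2.contains i = true
    · simp [hcnt]
    · have hnc : ¬ 0 < pn.2.count i := by rw [hcnt]; exact fun h => hmem h
      have hm : i ∉ pn.2 := by simpa using hmem
      simp [hnc, hm]

-- adding an element not among the scanned keys does not change the batch
theorem pv_scan_add (adj : List (Int × List Int)) (seen : PySem.Set Int) (i x : Int)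
    (hx : x ∉ adj.map Prod.fst) :
    pvScan adj (PySem.Set.add seen x) i = pvScan adj seen i := by
  unfold pvScan
  congr 1
  apply List.filter_congr
  intro pn hpn
  have hne : pn.1 ≠ x := by
    intro h; exact hx (by simpa [h] using List.mem_map_of_mem (f := Prod.fst) hpn)
  have : ((PySem.Set.add seen x).contains pn.1) = (seen.contains pn.1) := by
    by_cases hm : pn.1 ∈ seen
    · have h1 : seen.contains pn.1 = true := (PySem.Set.contains_iff _ _).mpr hm
      have h2 : (PySem.Set.add seen x).contains pn.1 = true :=
        (PySem.Set.contains_iff _ _).mpr ((PySem.Set.mem_add _ _ _).mpr (Or.inl hm))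
      rw [h1, h2]
    · have h1 : seen.contains pn.1 = false := by
        have h := PySem.Set.contains_iff seen pn.1
        revert h; cases seen.contains pn.1 <;> simp_all
      have h2 : (PySem.Set.add seen x).contains pn.1 = false := by
        have h := PySem.Set.contains_iff (PySem.Set.add seen x) pn.1
        have : pn.1 ∉ PySem.Set.add seen x := by
          rw [PySem.Set.mem_add]; rintro (h' | h') <;> [exact hm h'; exact hne h']
        revert h; cases (PySem.Set.add seen x).contains pn.1 <;> simp_all
      rw [h1, h2]
  rw [this]

-- with distinct keys, the incremental forward scan = batch filter + bulk update
theorem pv_step (i : Int) :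
    ∀ adj : List (Int × List Int), (adj.map Prod.fst).Nodup →
      ∀ (seen : PySem.Set Int) (q : List Int),
        adj.foldl
            (fun s pn => if s.1.contains pn.1 = false ∧ pn.2.contains i then (PySem.Set.add s.1 pn.1, s.2 ++ [pn.1]) else s)
            (seen, q)
          = ((pvScan adj seen i).foldl PySem.Set.add seen, q ++ pvScan adj seen i) := by
  intro adj
  induction adj with
  | nil => intro _ seen q; simp [pvScan]
  | cons pn adj ih =>
    intro hnd seen q
    have hnd2 : (pn.1 :: adj.map Prod.fst).Nodup := by simpa using hnd
    have hnd' : (adj.map Prod.fst).Nodup := (List.nodup_cons.mp hnd2).2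
    have hx : pn.1 ∉ adj.map Prod.fst := (List.nodup_cons.mp hnd2).1
    by_cases hg : seen.contains pn.1 = false ∧ pn.2.contains i = true
    · have hm1 : pn.1 ∉ seen := by
        intro h
        have hc := (PySem.Set.contains_iff seen pn.1).mpr h
        rw [hg.1] at hc
        exact Bool.noConfusion hc
      have hm2 : i ∈ pn.2 := by simpa using hg.2
      have hscan : pvScan (pn :: adj) seen i = pn.1 :: pvScan adj seen i := by
        unfold pvScan
        rw [List.filter_cons, if_pos (by simp [hm1, hm2])]
        simp
      rw [List.foldl_cons, if_pos (by exact ⟨hg.1, hg.2⟩), ih hnd',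
        pv_scan_add adj seen i pn.1 hx, hscan]
      simp [List.foldl_cons]
    · have hscan : pvScan (pn :: adj) seen i = pvScan adj seen i := by
        unfold pvScan
        rw [List.filter_cons, if_neg ?_]
        intro h
        simp only [Bool.and_eq_true, Bool.not_eq_true'] at h
        exact hg ⟨h.1, h.2⟩
      rw [List.foldl_cons, if_neg hg, ih hnd', hscan]

-- the two while-loops agree for every fuel and every state
theorem pv_loops (adj : List (Int × List Int)) (hnd : (adj.map Prod.fst).Nodup) (fuel : Nat) :
    ∀ (seen : PySem.Set Int) (q : List Int),
      pvLoopA (adj.foldl (fun r pn => pn.2.foldl (fun r j => r.modify j [] (· ++ [pn.1])) r) PySem.Dict.empty)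
          fuel seen q
        = pvLoopB adj fuel seen q := by
  induction fuel with
  | zero => intro seen q; rfl
  | succ fuel ih =>
    intro seen q
    cases q with
    | nil => rfl
    | cons i q =>
      simp only [pvLoopA, pvLoopB, pv_getD_rev]
      rw [show (PySem.Dict.empty : PySem.Dict Int (List Int)).getD i [] = [] from rfl,
          List.nil_append, pv_inner adj i (seen, q), pv_step i adj hnd seen q, ih]

-- ===== VERDICT (by name: the statement is the Claim_ definition above) =====
theorem reverse_closure_py_spec : Claim_equal_reverse_closure_py := by
  intro adj targets _ hpre
  unfold Spec_reverse_closure_py reverse_closure_py reverse_closure_py_alt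
  exact pv_loops adj hpre _ _ _
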